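-- pv_equiv track=rewrite | github.com/Sdevanahally/CS115 | hw6.py | count
-- ===== SOURCE A (Python) =====
-- def count(s):
--     '''Takes string s and returns list of all consecutive counts of the same digit'''
--     if s == '':
--         return 0
--     if len(s) == 1:
--         return 1
--     if s[0] == s[1]:
--         return 1 + count(s[1:])
--     else:
--         return 1
-- ===== SOURCE B (Python) =====
-- def count(s):
--     '''Length of the leading run of equal characters, as an iterative scan.'''
--     if s == '':
--         return 0
--     c = 1
--     for a, b in zip(s, s[1:]):
--         if a == b:
--             c += 1
--         else:
--             break
--     return c
-- ===== Notes on version B (the rewrite author's own statement) =====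
-- stated objective: faster
-- what changed: Replaces recursion over suffix slices (each slice copies the rest of the string) with a single iterative forward scan over adjacent pairs that breaks at the first inequality.
import Mathlib
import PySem

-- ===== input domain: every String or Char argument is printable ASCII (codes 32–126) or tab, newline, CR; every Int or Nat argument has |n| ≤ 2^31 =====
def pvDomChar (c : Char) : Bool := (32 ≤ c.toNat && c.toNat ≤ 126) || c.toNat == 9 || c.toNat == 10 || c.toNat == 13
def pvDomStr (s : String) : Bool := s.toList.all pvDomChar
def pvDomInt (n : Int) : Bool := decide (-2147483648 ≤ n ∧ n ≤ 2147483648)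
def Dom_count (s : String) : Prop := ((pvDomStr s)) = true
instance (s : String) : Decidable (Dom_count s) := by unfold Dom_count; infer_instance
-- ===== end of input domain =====

-- B replaces A's recursion over suffix slices with one iterative scan over adjacent pairs (objective: faster, fewer copies).

-- ===== PORT A =====
-- A's recursion on the string: '' → 0; single char → 1; s[0]==s[1] → 1 + count(s[1:]); else 1.
def countRecA : List Char → Int
  | [] => 0
  | [_] => 1
  | a :: b :: t => if a = b then 1 + countRecA (b :: t) else 1

def count (s : String) : Int := countRecA s.toList

-- ===== PORT B =====
-- loop over zip(s, s[1:]) with accumulator c, breaking at the first unequal pair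
def countLoopB : List (Char × Char) → Int → Int
  | [], c => c
  | (a, b) :: t, c => if a = b then countLoopB t (c + 1) else c

def count_alt (s : String) : Int :=
  if s.toList = [] then 0 else countLoopB (s.toList.zip s.toList.tail) 1

-- ===== PRECONDITION & SPEC =====
def Spec_count (s : String) (out : Int) : Prop := out = count_alt s
instance (s : String) (out : Int) : Decidable (Spec_count s out) := by unfold Spec_count; infer_instance

-- ===== CLAIM (what is proved, stated in full; the proofs are below) =====
def Claim_equal_count : Prop := ∀ (s : String), Dom_count s → Spec_count s (count s)

-- ===== LEMMAS AND PROOFS =====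
theorem countLoopB_succ (z : List (Char × Char)) (c : Int) :
    countLoopB z (c + 1) = countLoopB z c + 1 := by
  induction z generalizing c with
  | nil => rfl
  | cons p t ih =>
    obtain ⟨a, b⟩ := p
    simp only [countLoopB]
    split_ifs with h
    · exact ih (c + 1)
    · rfl

theorem countRecA_eq (l : List Char) :
    countRecA l = if l = [] then 0 else countLoopB (l.zip l.tail) 1 := by
  induction l with
  | nil => rfl
  | cons a t ih =>
    cases t with
    | nil => rfl
    | cons b t' =>
      simp only [countRecA, List.tail, List.zip, List.zipWith, countLoopB,
        reduceCtorEq, if_false] at *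
      split_ifs with h
      · rw [ih, countLoopB_succ]; ring
      · rfl

-- ===== VERDICT (by name: the statement is the Claim_ definition above) =====
theorem count_spec : Claim_equal_count := by
  intro s _
  unfold Spec_count count count_alt
  exact countRecA_eq s.toList
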